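-- pv_equiv track=rewrite | github.com/abhishektumula/DSA | unStop-100Days/day-3/sumOfDiffBits.py | sumOfDiffBits
-- ===== SOURCE A (Python) =====
-- def sumOfDiffBits (bit1 : str, bit2 : str) -> list :
--     if len(bit1) == len(bit2):
--         ctr = 0
--         i = j = 0
--         while i < len(bit1):
--             if bit1[i] != bit2[j]:
--                 ctr += 1
--
--             i += 1
--             j += 1
--         return ctr
--
--     else:
--         n = len(bit1)
--         combs = [bit2[i:i +n] for i in range(len(bit2) - n + 1)]
--         result = 0
--         for each in combs:
--             for i in range(len(each)):
--                 if each[i] != bit1[i]: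
--                     result += 1
--         return result
-- ===== SOURCE B (Python) =====
-- def sumOfDiffBits(bit1, bit2):
--     n, m = len(bit1), len(bit2)
--     W = m - n + 1  # number of length-n windows of bit2
--     if W <= 0:
--         return 0
--     total = 0
--     for j, c in enumerate(bit1):
--         # position j of bit1 is compared against bit2[j], ..., bit2[j+W-1]:
--         # mismatches there = W minus the occurrences of c in that stretch
--         total += W - bit2[j:j + W].count(c)
--     return total
-- ===== Notes on version B (the rewrite author's own statement) =====
-- stated objective: alternative
-- what changed: B drops the window enumeration: instead of comparing every length-n window of bit2 against bit1 position by position, it makes one pass over bit1's positions and charges each position j the value W minus the count of its character in the stretch bit2[j:j+W] it meets, handling the equal-length case by the same formula (W=1) with no branch.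
import Mathlib
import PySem

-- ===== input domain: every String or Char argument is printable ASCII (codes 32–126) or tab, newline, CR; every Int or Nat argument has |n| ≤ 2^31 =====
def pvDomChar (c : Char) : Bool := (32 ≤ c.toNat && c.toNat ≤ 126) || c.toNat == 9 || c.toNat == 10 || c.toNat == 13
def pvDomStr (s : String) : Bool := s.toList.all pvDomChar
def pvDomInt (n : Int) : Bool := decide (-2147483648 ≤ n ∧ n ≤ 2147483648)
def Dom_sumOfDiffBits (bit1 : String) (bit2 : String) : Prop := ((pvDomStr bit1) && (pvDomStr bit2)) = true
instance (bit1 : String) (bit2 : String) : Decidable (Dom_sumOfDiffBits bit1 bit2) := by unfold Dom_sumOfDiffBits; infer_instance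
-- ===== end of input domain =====

-- B replaces A's window-by-window comparison by one pass over bit1's positions, charging each
-- position W minus the count of its character in the stretch of bit2 it meets; equal-length
-- inputs are the W = 1 case of the same formula, so B has no branch on the lengths.

-- ===== PORT A =====
-- the while-loop of A's equal-length branch: i, j, ctr as in the Python (i = j throughout)
def pvLoopA (b1 b2 : List Char) (i j : Nat) (ctr : Int) : Int :=
  if i < b1.length then
    pvLoopA b1 b2 (i + 1) (j + 1)
      (if PySem.List.pyGet? b1 (i : Int) ≠ PySem.List.pyGet? b2 (j : Int) then ctr + 1 else ctr)
  else ctr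
termination_by b1.length - i

def sumOfDiffBits (bit1 : String) (bit2 : String) : Int :=
  let b1 := bit1.toList
  let b2 := bit2.toList
  if b1.length = b2.length then
    pvLoopA b1 b2 0 0 0
  else
    let n : Int := b1.length
    let combs := (PySem.List.pyRange 0 ((b2.length : Int) - n + 1)).map
      (fun i => PySem.List.slice b2 (some i) (some (i + n)))
    combs.foldl (fun result each =>
      (PySem.List.pyRange 0 ((each.length : Int))).foldl
        (fun result i =>
          if PySem.List.pyGet? each i ≠ PySem.List.pyGet? b1 i then result + 1 else result)
        result) 0

-- ===== PORT B =====
-- str.count of a single-character needle is exactly List.count of that character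
def sumOfDiffBits_alt (bit1 : String) (bit2 : String) : Int :=
  let b1 := bit1.toList
  let b2 := bit2.toList
  let n : Int := b1.length
  let m : Int := b2.length
  let W : Int := m - n + 1
  if W ≤ 0 then 0
  else
    (PySem.List.enumerate b1).foldl
      (fun total jc =>
        total + (W - ((PySem.List.slice b2 (some jc.1) (some (jc.1 + W))).count jc.2 : Int)))
      0

-- ===== PRECONDITION & SPEC =====
def Spec_sumOfDiffBits (bit1 : String) (bit2 : String) (out : Int) : Prop := out = sumOfDiffBits_alt bit1 bit2
instance (bit1 : String) (bit2 : String) (out : Int) : Decidable (Spec_sumOfDiffBits bit1 bit2 out) := by unfold Spec_sumOfDiffBits; infer_instance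

-- ===== CLAIM (what is proved, stated in full; the proofs are below) =====
def Claim_equal_sumOfDiffBits : Prop := ∀ (bit1 : String) (bit2 : String), Dom_sumOfDiffBits bit1 bit2 → Spec_sumOfDiffBits bit1 bit2 (sumOfDiffBits bit1 bit2)

-- ===== LEMMAS AND PROOFS =====

-- 0/1 indicator of a mismatch between bit2's position i+j and bit1's position j
def pvG (b1 b2 : List Char) (i j : Nat) : Int := if b2[i + j]? ≠ b1[j]? then 1 else 0

-- list-range sum ↔ Finset.range sum
lemma pvSumMapRange (f : Nat → Int) (n : Nat) :
    ((List.range n).map f).sum = ∑ k ∈ Finset.range n, f k := by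
  induction n with
  | zero => simp
  | succ n ih => simp [List.range_succ, Finset.sum_range_succ, ih]

lemma pvCountPRange (p : Nat → Prop) [DecidablePred p] (n : Nat) :
    ((List.range n).countP (fun k => decide (p k)) : Int)
      = ∑ k ∈ Finset.range n, (if p k then (1 : Int) else 0) := by
  induction n with
  | zero => simp
  | succ n ih =>
    rw [List.range_succ, List.countP_append, Finset.sum_range_succ, ← ih]
    by_cases h : p n <;> simp [h]

-- KEY COUNTING LEMMA (B side): W minus the occurrences of c in b2[j .. j+W) is the
-- number of positions i < W with b2[i+j] ≠ c
lemma pvCount (b2 : List Char) (c : Char) (W : Nat) :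
    ∀ j : Nat, j + W ≤ b2.length →
      (W : Int) - (((b2.drop j).take W).count c : Int)
        = ∑ i ∈ Finset.range W, (if b2[i + j]? ≠ some c then (1 : Int) else 0) := by
  induction W with
  | zero => intro j h; simp
  | succ W ih =>
    intro j h
    have hj : j < b2.length := by omega
    have hdrop : b2.drop j = b2[j] :: b2.drop (j + 1) := List.drop_eq_getElem_cons hj
    rw [hdrop, List.take_succ_cons, List.count_cons,
      Finset.sum_range_succ' (fun i => if b2[i + j]? ≠ some c then (1 : Int) else 0) W]
    have hre : ∀ i : Nat, i + 1 + j = i + (j + 1) := by omega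
    have hih := ih (j + 1) (by omega)
    simp only [hre]
    rw [← hih]
    have hget : b2[j]? = some b2[j] := List.getElem?_eq_getElem hj
    by_cases hc : b2[j] = c
    · simp [hget, hc]
    · simp [hget, hc]
      omega

-- fold over enumerate (B's loop) as a Finset.range sum
lemma pvEnumFold (f : Int × Char → Int) :
    ∀ (l : List Char) (j0 : Nat) (t : Int),
      (PySem.List.enumerate l (j0 : Int)).foldl (fun total jc => total + f jc) t
        = t + ∑ k ∈ Finset.range l.length, f (((j0 + k : Nat) : Int), l.getD k 'x') := by
  intro l
  induction l with
  | nil => intro j0 t; simp [PySem.List.enumerate_nil]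
  | cons x xs ih =>
    intro j0 t
    rw [PySem.List.enumerate_cons, List.foldl_cons]
    have : (j0 : Int) + 1 = ((j0 + 1 : Nat) : Int) := by push_cast; ring
    rw [this, ih (j0 + 1)]
    rw [List.length_cons,
      Finset.sum_range_succ' (fun k => f (((j0 + k : Nat) : Int), (x :: xs).getD k 'x')) xs.length]
    have hre : ∀ k : Nat, ((j0 + (k + 1) : Nat) : Int) = ((j0 + 1 + k : Nat) : Int) := by
      intro k; push_cast; ring
    simp only [List.getD_cons_succ, List.getD_cons_zero, hre, Nat.add_zero]
    ring

-- B's characterization when there is at least one window (n ≤ m)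
lemma pvAltEq (bit1 bit2 : String) (h : bit1.toList.length ≤ bit2.toList.length) :
    sumOfDiffBits_alt bit1 bit2
      = ∑ j ∈ Finset.range bit1.toList.length,
          ∑ i ∈ Finset.range (bit2.toList.length - bit1.toList.length + 1),
            pvG bit1.toList bit2.toList i j := by
  have hW : ¬ ((bit2.toList.length : Int) - (bit1.toList.length : Int) + 1 ≤ 0) := by omega
  simp only [sumOfDiffBits_alt]
  rw [if_neg hW]
  rw [show (0 : Int) = ((0 : Nat) : Int) from rfl, pvEnumFold]
  simp only [Nat.cast_zero, zero_add]
  apply Finset.sum_congr rfl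
  intro k hk
  rw [Finset.mem_range] at hk
  have hcast : (bit2.toList.length : Int) - (bit1.toList.length : Int) + 1
      = ((bit2.toList.length - bit1.toList.length + 1 : Nat) : Int) := by omega
  rw [hcast, PySem.List.slice_natCast_add]
  rw [List.getD_eq_getElem bit1.toList 'x' hk]
  rw [pvCount bit2.toList _ _ k (by omega)]
  apply Finset.sum_congr rfl
  intro i _
  simp only [pvG, List.getElem?_eq_getElem hk]

-- A's while loop as a sum
lemma pvLoopAEq (b1 b2 : List Char) (hlen : b1.length = b2.length) :
    ∀ (d i : Nat) (ctr : Int), d = b1.length - i →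
      pvLoopA b1 b2 i i ctr
        = ctr + ∑ k ∈ Finset.range d, (if b1[i + k]? ≠ b2[i + k]? then (1 : Int) else 0) := by
  intro d
  induction d with
  | zero =>
    intro i ctr hd
    rw [pvLoopA, if_neg (by omega)]
    simp
  | succ d ih =>
    intro i ctr hd
    have hi : i < b1.length := by omega
    rw [pvLoopA, if_pos hi, ih (i + 1) _ (by omega)]
    rw [Finset.sum_range_succ' (fun k => if b1[i + k]? ≠ b2[i + k]? then (1 : Int) else 0) d]
    have hsum : ∑ k ∈ Finset.range d, (if b1[i + (k + 1)]? ≠ b2[i + (k + 1)]? then (1 : Int) else 0)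
        = ∑ k ∈ Finset.range d, (if b1[i + 1 + k]? ≠ b2[i + 1 + k]? then (1 : Int) else 0) := by
      apply Finset.sum_congr rfl
      intro k _
      have hre : i + (k + 1) = i + 1 + k := by omega
      rw [hre]
    rw [hsum]
    simp only [Nat.add_zero, PySem.List.pyGet?_natCast]
    split_ifs <;> ring

-- A's nested else-branch loops: outer fold as a sum of inner countP's
lemma pvOuterFold (b1 : List Char) (L : List (List Char)) :
    ∀ t : Int,
      L.foldl (fun result each =>
        (PySem.List.pyRange 0 ((each.length : Int))).foldl
          (fun result i =>
            if PySem.List.pyGet? each i ≠ PySem.List.pyGet? b1 i then result + 1 else result)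
          result) t
      = t + (L.map (fun each =>
          (((PySem.List.pyRange 0 ((each.length : Int))).countP
            (fun i => decide (PySem.List.pyGet? each i ≠ PySem.List.pyGet? b1 i)) : Nat) : Int))).sum := by
  induction L with
  | nil => intro t; simp
  | cons e L ih =>
    intro t
    rw [List.foldl_cons, List.map_cons, List.sum_cons, ih,
      PySem.List.foldl_ite_add_one (fun i => PySem.List.pyGet? e i ≠ PySem.List.pyGet? b1 i)]
    ring

-- a window's mismatch count against bit1, as a sum over positions
lemma pvWindowCnt (b1 b2 : List Char) (k : Nat) (hkn : k + b1.length ≤ b2.length) :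
    (((PySem.List.pyRange 0 ((((b2.drop k).take b1.length).length : Int))).countP
        (fun i => decide (PySem.List.pyGet? ((b2.drop k).take b1.length) i
          ≠ PySem.List.pyGet? b1 i)) : Nat) : Int)
      = ∑ j ∈ Finset.range b1.length, pvG b1 b2 k j := by
  have hlen : ((b2.drop k).take b1.length).length = b1.length := by
    simp [List.length_take, List.length_drop]; omega
  rw [hlen, PySem.List.pyRange_one]
  simp only [Int.sub_zero, Int.toNat_natCast, List.countP_map, Function.comp_def]
  rw [pvCountPRange
    (fun j : Nat => PySem.List.pyGet? ((b2.drop k).take b1.length) (0 + (j : Int))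
      ≠ PySem.List.pyGet? b1 (0 + (j : Int)))]
  apply Finset.sum_congr rfl
  intro j hj
  rw [Finset.mem_range] at hj
  have h0 : (0 : Int) + (j : Int) = ((j : Nat) : Int) := by omega
  rw [h0, PySem.List.pyGet?_natCast, PySem.List.pyGet?_natCast,
    List.getElem?_take_of_lt hj, List.getElem?_drop]
  rfl

-- A's else branch as a double sum (n ≤ m case)
lemma pvAElseEq (bit1 bit2 : String) (hne : bit1.toList.length ≠ bit2.toList.length)
    (h : bit1.toList.length ≤ bit2.toList.length) :
    sumOfDiffBits bit1 bit2
      = ∑ i ∈ Finset.range (bit2.toList.length - bit1.toList.length + 1),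
          ∑ j ∈ Finset.range bit1.toList.length,
            pvG bit1.toList bit2.toList i j := by
  simp only [sumOfDiffBits]
  rw [if_neg hne, pvOuterFold]
  rw [zero_add, List.map_map]
  have hcast : ((bit2.toList.length : Int) - (bit1.toList.length : Int) + 1).toNat
      = bit2.toList.length - bit1.toList.length + 1 := by omega
  rw [PySem.List.pyRange_one, List.map_map]
  simp only [Int.sub_zero, hcast]
  rw [pvSumMapRange]
  apply Finset.sum_congr rfl
  intro k hk
  rw [Finset.mem_range] at hk
  have h0 : (0 : Int) + (k : Int) = ((k : Nat) : Int) := by omega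
  simp only [Function.comp_apply, h0, PySem.List.slice_natCast_add]
  exact pvWindowCnt bit1.toList bit2.toList k (by omega)

-- ===== VERDICT (by name: the statement is the Claim_ definition above) =====
theorem sumOfDiffBits_spec : Claim_equal_sumOfDiffBits := by
  intro bit1 bit2 _
  unfold Spec_sumOfDiffBits
  by_cases hlen : bit1.toList.length = bit2.toList.length
  · have hA : sumOfDiffBits bit1 bit2 = pvLoopA bit1.toList bit2.toList 0 0 0 := by
      simp only [sumOfDiffBits]; rw [if_pos hlen]
    rw [hA, pvLoopAEq bit1.toList bit2.toList hlen bit1.toList.length 0 0 (by omega),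
      pvAltEq bit1 bit2 (by omega)]
    have h1 : bit2.toList.length - bit1.toList.length + 1 = 1 := by omega
    rw [h1, zero_add]
    apply Finset.sum_congr rfl
    intro j hj
    rw [Finset.sum_range_one]
    simp only [pvG, Nat.zero_add]
    by_cases hc : bit1.toList[j]? = bit2.toList[j]? <;> simp [hc, Ne, eq_comm]
  · by_cases hle : bit1.toList.length ≤ bit2.toList.length
    · rw [pvAElseEq bit1 bit2 hlen hle, pvAltEq bit1 bit2 hle]
      exact Finset.sum_comm
    · have hA : sumOfDiffBits bit1 bit2 = 0 := by
        simp only [sumOfDiffBits]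
        rw [if_neg hlen]
        have hr : PySem.List.pyRange 0
            ((bit2.toList.length : Int) - (bit1.toList.length : Int) + 1) = [] := by
          rw [PySem.List.pyRange_one]
          have ht : (((bit2.toList.length : Int) - (bit1.toList.length : Int) + 1) - 0).toNat
              = 0 := by omega
          rw [ht]; simp
        rw [hr]; simp
      have hB : sumOfDiffBits_alt bit1 bit2 = 0 := by
        simp only [sumOfDiffBits_alt]
        rw [if_pos (by omega)]
      rw [hA, hB]
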